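-- pv_equiv track=rewrite | github.com/ZeroProphet/klefki | tests/zkp/test_plonk.py | permute_idices
-- ===== SOURCE A (Python) =====
-- def permute_idices(wires: list[str]) -> list[int]:
--     # This function takes an array "circuit" of arbitrary values and returns an
--     # array with shuffles the indices of "circuit" for repeating values
--     size = len(wires)
--     permutation = [i + 1 for i in range(size)]
--     for i in range(size):
--         for j in range(i + 1, size):
--             if wires[i] == wires[j]:
--                 permutation[i], permutation[j] = permutation[j], permutation[i]
--                 break
--     return permutation
-- ===== SOURCE B (Python) =====
-- def permute_idices(wires: list[str]) -> list[int]: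
--     # For each position, the permuted index is the next occurrence of the same
--     # value (1-based), wrapping around to the first occurrence: one forward pass
--     # to record first occurrences, one backward pass carrying the next occurrence
--     # seen so far in a dict.  O(n) instead of A's O(n^2) nested scans.
--     first = {}
--     for i, w in enumerate(wires):
--         first.setdefault(w, i)
--     nxt = {}
--     out = []
--     for i in reversed(range(len(wires))):
--         w = wires[i]
--         out.append(nxt.get(w, first[w]) + 1)
--         nxt[w] = i
--     out.reverse()
--     return out
-- ===== Notes on version B (the rewrite author's own statement) =====
-- stated objective: faster
-- what changed: Replaces the O(n^2) nested swap loops with two O(n) dict passes: record each value's first occurrence, then scan backwards carrying the next occurrence of each value, so position i gets next-occurrence(i)+1 wrapping to the first occurrence.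
import Mathlib
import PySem

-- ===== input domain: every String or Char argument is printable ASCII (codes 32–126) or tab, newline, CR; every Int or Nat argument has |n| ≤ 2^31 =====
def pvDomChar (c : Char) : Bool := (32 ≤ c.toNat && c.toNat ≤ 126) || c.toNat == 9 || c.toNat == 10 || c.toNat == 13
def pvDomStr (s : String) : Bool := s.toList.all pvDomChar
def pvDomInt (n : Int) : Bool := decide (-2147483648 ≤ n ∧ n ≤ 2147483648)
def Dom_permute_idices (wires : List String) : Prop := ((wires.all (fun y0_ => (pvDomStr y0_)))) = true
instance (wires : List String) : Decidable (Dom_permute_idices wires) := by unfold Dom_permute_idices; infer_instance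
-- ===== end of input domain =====

-- B replaces A's O(n^2) nested swap loops by two linear dict passes (first
-- occurrence forward, next occurrence backward); equivalence of the return
-- values is proved for all inputs (both functions are total).

-- ===== PORT A =====
-- inner loop of A: first j ≥ start with wires[j] == v (break), none if no match
def findFrom (wires : List String) (v : String) (j : Nat) : Option Nat :=
  if h : j < wires.length then
    if wires.getD j "" = v then some j else findFrom wires v (j + 1)
  else none
termination_by wires.length - j

-- one outer iteration of A: find the first matching j > i and swap (indices are
-- always in range, so getD 0 is exact)
def stepA (wires : List String) (perm : List Int) (i : Nat) : List Int :=
  match findFrom wires (wires.getD i "") (i + 1) with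
  | some j => (perm.set i (perm.getD j 0)).set j (perm.getD i 0)
  | none => perm

def permute_idices (wires : List String) : List Int :=
  (List.range wires.length).foldl (stepA wires)
    ((List.range wires.length).map (fun i => Int.ofNat i + 1))

-- ===== PORT B =====
-- first.setdefault(w, i) over enumerate(wires)
def firstPass (wires : List String) : PySem.Dict String Int :=
  (PySem.List.enumerate wires).foldl
    (fun d p => d.setdefault p.2 p.1) PySem.Dict.empty

-- the backward loop `for i in reversed(range(len(wires)))`, appending to out;
-- first[w] always has the key, so `(first.get? w).getD 0` is exact
def bLoop (wires : List String) (first : PySem.Dict String Int) :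
    Nat → PySem.Dict String Int → List Int → List Int
  | 0, _, out => out
  | i + 1, nxt, out =>
      let w := wires.getD i ""
      let v := ((nxt.get? w).getD ((first.get? w).getD 0)) + 1
      bLoop wires first i (nxt.insert w (i : Int)) (out ++ [v])

def permute_idices_alt (wires : List String) : List Int :=
  (bLoop wires (firstPass wires) wires.length PySem.Dict.empty []).reverse

-- ===== PRECONDITION & SPEC =====
def Spec_permute_idices (wires : List String) (out : List Int) : Prop := out = permute_idices_alt wires
instance (wires : List String) (out : List Int) : Decidable (Spec_permute_idices wires out) := by unfold Spec_permute_idices; infer_instance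

-- ===== CLAIM (what is proved, stated in full; the proofs are below) =====
def Claim_equal_permute_idices : Prop := ∀ (wires : List String), Dom_permute_idices wires → Spec_permute_idices wires (permute_idices wires)

-- ===== LEMMAS AND PROOFS =====

-- shorthand: the value at index t
def wG (wires : List String) (t : Nat) : String := wires.getD t ""

-- the common characterisation: next occurrence after t, wrapping to the first
def fstOcc (wires : List String) (t : Nat) : Nat :=
  (findFrom wires (wG wires t) 0).getD t

def target (wires : List String) (t : Nat) : Int :=
  match findFrom wires (wG wires t) (t + 1) with
  | some j => (j : Int) + 1
  | none => (fstOcc wires t : Int) + 1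

-- the invariant of A's outer loop after i iterations
def g (wires : List String) (i t : Nat) : Int :=
  if t < i then target wires t
  else if (∃ s, s < i ∧ wG wires s = wG wires t) ∧
          (∀ s, s < t → i ≤ s → wG wires s ≠ wG wires t)
       then (fstOcc wires t : Int) + 1 else (t : Int) + 1

lemma findFrom_stop (wires : List String) (v : String) (j : Nat)
    (h : ¬ j < wires.length) : findFrom wires v j = none := by
  rw [findFrom]; simp [h]

lemma findFrom_step (wires : List String) (v : String) (j : Nat)
    (h : j < wires.length) :
    findFrom wires v j = if wires.getD j "" = v then some j else findFrom wires v (j + 1) := by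
  rw [findFrom]; simp [h]

lemma findFrom_some (wires : List String) (v : String) :
    ∀ j k, findFrom wires v j = some k →
      j ≤ k ∧ k < wires.length ∧ wires.getD k "" = v ∧
      ∀ m, j ≤ m → m < k → wires.getD m "" ≠ v := by
  have main : ∀ f j k, wires.length - j ≤ f → findFrom wires v j = some k →
      j ≤ k ∧ k < wires.length ∧ wires.getD k "" = v ∧
      ∀ m, j ≤ m → m < k → wires.getD m "" ≠ v := by
    intro f
    induction f with
    | zero =>
      intro j k hf hfind
      rw [findFrom_stop wires v j (by omega)] at hfind
      exact absurd hfind (by simp)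
    | succ f ih =>
      intro j k hf hfind
      by_cases hj : j < wires.length
      · rw [findFrom_step wires v j hj] at hfind
        split_ifs at hfind with he
        · cases hfind
          exact ⟨le_refl _, hj, he, by omega⟩
        · obtain ⟨h1, h2, h3, h4⟩ := ih (j + 1) k (by omega) hfind
          refine ⟨by omega, h2, h3, ?_⟩
          intro m hm1 hm2
          rcases Nat.eq_or_lt_of_le hm1 with h | h
          · subst h; exact he
          · exact h4 m h hm2
      · rw [findFrom_stop wires v j hj] at hfind
        exact absurd hfind (by simp)
  intro j k
  exact main (wires.length - j) j k (le_refl _)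

lemma findFrom_none (wires : List String) (v : String) :
    ∀ j, findFrom wires v j = none →
      ∀ m, j ≤ m → m < wires.length → wires.getD m "" ≠ v := by
  have main : ∀ f j, wires.length - j ≤ f → findFrom wires v j = none →
      ∀ m, j ≤ m → m < wires.length → wires.getD m "" ≠ v := by
    intro f
    induction f with
    | zero =>
      intro j hf _ m hm1 hm2
      omega
    | succ f ih =>
      intro j hf hfind m hm1 hm2
      by_cases hj : j < wires.length
      · rw [findFrom_step wires v j hj] at hfind
        split_ifs at hfind with he
        rcases Nat.eq_or_lt_of_le hm1 with h | h
        · subst h; exact he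
        · exact ih (j + 1) (by omega) hfind m h hm2
      · omega
  intro j
  exact main (wires.length - j) j (le_refl _)

lemma findFrom_isSome (wires : List String) (v : String) (j k : Nat)
    (hk : k < wires.length) (hv : wires.getD k "" = v) (hj : j ≤ k) :
    (findFrom wires v j).isSome := by
  cases h : findFrom wires v j with
  | some _ => rfl
  | none => exact absurd hv (findFrom_none wires v j h k hj hk)

-- fstOcc t is the first index with the same value
lemma fstOcc_spec (wires : List String) (t : Nat) (ht : t < wires.length) :
    fstOcc wires t ≤ t ∧ wG wires (fstOcc wires t) = wG wires t ∧
      ∀ m, m < fstOcc wires t → wG wires m ≠ wG wires t := by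
  have hs : (findFrom wires (wG wires t) 0).isSome :=
    findFrom_isSome wires (wG wires t) 0 t ht rfl (Nat.zero_le t)
  obtain ⟨k, hk⟩ := Option.isSome_iff_exists.mp hs
  obtain ⟨-, hkn, hkv, hmin⟩ := findFrom_some wires (wG wires t) 0 k hk
  have hkt : k ≤ t := by
    by_contra h
    exact hmin t (Nat.zero_le t) (by omega) rfl
  unfold fstOcc
  rw [hk]
  exact ⟨hkt, hkv, fun m hm => hmin m (Nat.zero_le m) hm⟩

lemma fstOcc_congr (wires : List String) (s t : Nat)
    (hs : s < wires.length) (h : wG wires s = wG wires t) :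
    fstOcc wires s = fstOcc wires t := by
  have hs' : (findFrom wires (wG wires s) 0).isSome :=
    findFrom_isSome wires (wG wires s) 0 s hs rfl (Nat.zero_le s)
  obtain ⟨k, hk⟩ := Option.isSome_iff_exists.mp hs'
  unfold fstOcc
  rw [← h, hk]
  rfl

lemma fstOcc_eq_self (wires : List String) (t : Nat) (ht : t < wires.length)
    (h : ∀ s, s < t → wG wires s ≠ wG wires t) : fstOcc wires t = t := by
  obtain ⟨h1, h2, h3⟩ := fstOcc_spec wires t ht
  rcases Nat.eq_or_lt_of_le h1 with he | hlt
  · exact he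
  · exact absurd h2 (h _ hlt)

lemma g_self (wires : List String) (i : Nat) (hi : i < wires.length) :
    g wires i i = (fstOcc wires i : Int) + 1 := by
  unfold g
  rw [if_neg (lt_irrefl i)]
  by_cases hc : ∃ s, s < i ∧ wG wires s = wG wires i
  · rw [if_pos ⟨hc, fun s hs1 hs2 => absurd hs1 (by omega)⟩]
  · rw [if_neg (fun h => hc h.1)]
    push Not at hc
    rw [fstOcc_eq_self wires i hi hc]

lemma mapRange_getD (n : Nat) (f : Nat → Int) (j : Nat) (d : Int) (h : j < n) :
    ((List.range n).map f).getD j d = f j := by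
  simp [List.getD_eq_getElem?_getD, h]

-- if the values at i and t differ, advancing the loop counter past i does not
-- change the invariant value at t
lemma g_congr_ne (wires : List String) (i t : Nat) (hit : i < t)
    (hw : wG wires i ≠ wG wires t) : g wires i t = g wires (i + 1) t := by
  unfold g
  rw [if_neg (by omega : ¬ t < i), if_neg (by omega : ¬ t < i + 1)]
  have hiff : ((∃ s, s < i ∧ wG wires s = wG wires t) ∧
        (∀ s, s < t → i ≤ s → wG wires s ≠ wG wires t)) ↔
      ((∃ s, s < i + 1 ∧ wG wires s = wG wires t) ∧
        (∀ s, s < t → i + 1 ≤ s → wG wires s ≠ wG wires t)) := by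
    constructor
    · rintro ⟨⟨s, hs1, hs2⟩, hall⟩
      exact ⟨⟨s, by omega, hs2⟩, fun s hs1 hs2 => hall s hs1 (by omega)⟩
    · rintro ⟨⟨s, hs1, hs2⟩, hall⟩
      refine ⟨⟨s, ?_, hs2⟩, ?_⟩
      · rcases Nat.lt_succ_iff_lt_or_eq.mp hs1 with h | h
        · exact h
        · exact absurd hs2 (h ▸ hw)
      · intro s hs1' hs2'
        rcases Nat.eq_or_lt_of_le hs2' with h | h
        · exact h ▸ hw
        · exact hall s hs1' h
  rw [if_congr hiff rfl rfl]

-- the key step lemma for A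
lemma stepA_eq (wires : List String) (i : Nat) (hi : i < wires.length) :
    stepA wires ((List.range wires.length).map (g wires i)) i =
      (List.range wires.length).map (g wires (i + 1)) := by
  cases hfind : findFrom wires (wires.getD i "") (i + 1) with
  | none =>
    have hn := findFrom_none wires (wires.getD i "") (i + 1) hfind
    simp only [stepA, hfind]
    apply List.map_congr_left
    intro t ht
    rw [List.mem_range] at ht
    rcases lt_trichotomy t i with h | h | h
    · unfold g
      rw [if_pos h, if_pos (by omega)]
    · subst h
      rw [g_self wires t hi]
      unfold g
      rw [if_pos (by omega)]
      unfold target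
      simp only [wG]
      rw [hfind]
    · by_cases hw : wG wires i = wG wires t
      · exact absurd hw.symm (hn t (by omega) ht)
      · exact g_congr_ne wires i t h hw
  | some j =>
    obtain ⟨hj1, hj2, hj3, hj4⟩ := findFrom_some wires (wires.getD i "") (i + 1) j hfind
    simp only [stepA, hfind]
    rw [mapRange_getD _ _ _ _ hj2, mapRange_getD _ _ _ _ hi]
    apply List.ext_getElem
    · simp
    · intro t h1 h2
      simp only [List.getElem_set, List.getElem_map, List.getElem_range]
      have htn : t < wires.length := by simpa using h2
      split_ifs with hjt hit
    -- t = j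
      · subst hjt
        rw [g_self wires i hi]
        have hfj : fstOcc wires j = fstOcc wires i := fstOcc_congr wires j i hj2 hj3
        unfold g
        rw [if_neg (by omega : ¬ j < i + 1)]
        rw [if_pos ⟨⟨i, by omega, hj3.symm⟩,
          fun s hs1 hs2 he => hj4 s hs2 hs1 (he.trans hj3)⟩]
        rw [hfj]
    -- t = i
      · subst hit
        have hL : g wires i j = (j : Int) + 1 := by
          unfold g
          rw [if_neg (by omega : ¬ j < i)]
          rw [if_neg (fun hc => hc.2 i hj1 (le_refl i) hj3.symm)]
        have hR : g wires (i + 1) i = (j : Int) + 1 := by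
          unfold g
          rw [if_pos (by omega)]
          unfold target
          simp only [wG]
          rw [hfind]
        rw [hL, hR]
    -- t ∉ {i, j}
      · rcases lt_trichotomy t i with h | h | h
        · unfold g
          rw [if_pos h, if_pos (by omega)]
        · exact absurd h.symm hit
        · by_cases hw : wG wires i = wG wires t
          · have hjt' : j < t := by
              rcases Nat.lt_or_ge t j with hlt | hge
              · exact absurd hw.symm (hj4 t (by omega) hlt)
              · omega
            unfold g
            rw [if_neg (by omega : ¬ t < i), if_neg (by omega : ¬ t < i + 1)]
            rw [if_neg (fun hc => hc.2 i h (le_refl i) hw)]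
            rw [if_neg (fun hc => hc.2 j hjt' hj1 (hj3.trans hw))]
          · exact g_congr_ne wires i t h hw

lemma A_loop (wires : List String) :
    ∀ k, k ≤ wires.length →
      (List.range k).foldl (stepA wires)
          ((List.range wires.length).map (fun i => Int.ofNat i + 1)) =
        (List.range wires.length).map (g wires k) := by
  intro k
  induction k with
  | zero =>
    intro _
    simp only [List.range_zero, List.foldl_nil]
    apply List.map_congr_left
    intro t _
    unfold g
    rw [if_neg (by omega : ¬ t < 0), if_neg (fun hc => by obtain ⟨s, hs, -⟩ := hc.1; omega)]
    rfl
  | succ k ih =>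
    intro hk
    rw [List.range_succ, List.foldl_append, List.foldl_cons, List.foldl_nil,
      ih (by omega), stepA_eq wires k (by omega)]

lemma A_eq (wires : List String) :
    permute_idices wires = (List.range wires.length).map (target wires) := by
  unfold permute_idices
  rw [A_loop wires wires.length (le_refl _)]
  apply List.map_congr_left
  intro t ht
  rw [List.mem_range] at ht
  unfold g
  rw [if_pos ht]

-- B side -----------------------------------------------------------------

lemma setdefault_eq (d : PySem.Dict String Int) (k : String) (w : Int) :
    d.setdefault k w = if d.contains k then d else d.insert k w := by
  unfold PySem.Dict.setdefault
  split_ifs with h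
  · rfl
  · apply PySem.Dict.ext
    rw [PySem.Dict.items_insert_of_not_contains d w (by simpa using h)]

lemma fp_aux (v : String) : ∀ (xs : List String) (s : Int) (d : PySem.Dict String Int),
    (((PySem.List.enumerate xs s).foldl (fun d p => d.setdefault p.2 p.1) d).get? v) =
      match d.get? v with
      | some x => some x
      | none => (xs.findIdx? (fun x => x == v)).map (fun k => s + Int.ofNat k) := by
  intro xs
  induction xs with
  | nil =>
    intro s d
    simp only [PySem.List.enumerate_nil, List.foldl_nil, List.findIdx?_nil, Option.map_none]
    cases d.get? v <;> rfl
  | cons x xs ih =>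
    intro s d
    rw [PySem.List.enumerate_cons, List.foldl_cons, ih (s + 1) (d.setdefault x s),
      setdefault_eq d x s]
    rw [List.findIdx?_cons]
    by_cases hc : d.contains x
    · rw [if_pos hc]
      cases hd : d.get? v with
      | some y => rfl
      | none =>
        have hx : ¬ x = v := by
          intro he
          subst he
          rw [PySem.Dict.contains_eq_isSome_get? d x, hd] at hc
          simp at hc
        simp only [beq_iff_eq, hx, if_false]
        rw [Option.map_map]
        cases xs.findIdx? (fun x => x == v) with
        | none => rfl
        | some k =>
          simp only [Option.map_some, Function.comp]
          congr 1
          simp only [Int.ofNat_eq_natCast]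
          push_cast
          ring
    · rw [if_neg hc]
      by_cases hx : x = v
      · subst hx
        rw [PySem.Dict.get?_insert_self]
        have hd : d.get? x = none := by
          rw [PySem.Dict.get?_eq_none_iff_contains d x]
          simpa using hc
        rw [hd]
        simp
      · rw [PySem.Dict.get?_insert_of_ne d s (fun he => hx he.symm)]
        cases hd : d.get? v with
        | some y => rfl
        | none =>
          simp only [beq_iff_eq, hx, if_false]
          rw [Option.map_map]
          cases xs.findIdx? (fun x => x == v) with
          | none => rfl
          | some k =>
            simp only [Option.map_some, Function.comp]
            congr 1
            simp only [Int.ofNat_eq_natCast]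
            push_cast
            ring

lemma findFrom_eq_findIdx (wires : List String) (v : String) :
    ∀ j, findFrom wires v j =
      ((wires.drop j).findIdx? (fun x => x == v)).map (fun k => j + k) := by
  have main : ∀ f j, wires.length - j ≤ f → findFrom wires v j =
      ((wires.drop j).findIdx? (fun x => x == v)).map (fun k => j + k) := by
    intro f
    induction f with
    | zero =>
      intro j hf
      rw [findFrom_stop wires v j (by omega),
        List.drop_eq_nil_of_le (by omega : wires.length ≤ j)]
      rfl
    | succ f ih =>
      intro j hf
      by_cases hj : j < wires.length
      · rw [findFrom_step wires v j hj, ← List.getElem_cons_drop hj,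
          List.findIdx?_cons]
        rw [List.getD_eq_getElem wires "" hj]
        by_cases hx : wires[j] = v
        · simp [hx]
        · simp only [beq_iff_eq, hx, if_false]
          rw [ih (j + 1) (by omega), Option.map_map]
          cases (wires.drop (j + 1)).findIdx? (fun x => x == v) with
          | none => rfl
          | some k =>
            simp only [Option.map_some, Function.comp]
            congr 1
            omega
      · rw [findFrom_stop wires v j hj,
          List.drop_eq_nil_of_le (by omega : wires.length ≤ j)]
        rfl
  intro j
  exact main (wires.length - j) j (le_refl _)

lemma firstPass_get? (wires : List String) (v : String) :
    (firstPass wires).get? v = (findFrom wires v 0).map (fun k => Int.ofNat k) := by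
  unfold firstPass
  rw [fp_aux v wires 0 PySem.Dict.empty]
  rw [PySem.Dict.get?_empty]
  rw [findFrom_eq_findIdx wires v 0, List.drop_zero, Option.map_map]
  cases wires.findIdx? (fun x => x == v) with
  | none => rfl
  | some k =>
    simp only [Option.map_some, Function.comp]
    congr 1

lemma bLoop_eq (wires : List String) :
    ∀ i, i ≤ wires.length → ∀ (nxt : PySem.Dict String Int) (out : List Int),
      (∀ v, nxt.get? v = (findFrom wires v i).map (fun k => Int.ofNat k)) →
      bLoop wires (firstPass wires) i nxt out =
        out ++ ((List.range i).map (target wires)).reverse := by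
  intro i
  induction i with
  | zero =>
    intro _ nxt out _
    simp [bLoop]
  | succ i ih =>
    intro hi nxt out hinv
    have hin : i < wires.length := by omega
    have hv : ((nxt.get? (wires.getD i "")).getD
        (((firstPass wires).get? (wires.getD i "")).getD 0)) + 1 = target wires i := by
      rw [hinv (wires.getD i "")]
      cases hf : findFrom wires (wires.getD i "") (i + 1) with
      | some j =>
        unfold target
        simp only [wG]
        rw [hf]
        rfl
      | none =>
        rw [firstPass_get?]
        have hs : (findFrom wires (wires.getD i "") 0).isSome :=
          findFrom_isSome wires (wires.getD i "") 0 i hin rfl (Nat.zero_le i)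
        obtain ⟨k, hk⟩ := Option.isSome_iff_exists.mp hs
        unfold target fstOcc
        simp only [wG]
        rw [hf, hk]
        rfl
    have hinv' : ∀ v, (nxt.insert (wires.getD i "") ((i : Nat) : Int)).get? v =
        (findFrom wires v i).map (fun k => Int.ofNat k) := by
      intro v
      by_cases hveq : v = wires.getD i ""
      · rw [hveq, PySem.Dict.get?_insert_self,
          findFrom_step wires (wires.getD i "") i hin, if_pos rfl]
        rfl
      · rw [PySem.Dict.get?_insert_of_ne nxt ((i : Nat) : Int) hveq, hinv v]
        rw [findFrom_step wires v i hin, if_neg (fun he => hveq he.symm)]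
    simp only [bLoop]
    rw [ih (by omega) _ _ hinv', hv]
    rw [List.range_succ, List.map_append, List.reverse_append]
    simp

lemma B_eq (wires : List String) :
    permute_idices_alt wires = (List.range wires.length).map (target wires) := by
  unfold permute_idices_alt
  rw [bLoop_eq wires wires.length (le_refl _) PySem.Dict.empty []
    (fun v => by
      rw [PySem.Dict.get?_empty, findFrom_stop wires v wires.length (lt_irrefl _)]
      rfl)]
  simp

-- ===== VERDICT (by name: the statement is the Claim_ definition above) =====
theorem permute_idices_spec : Claim_equal_permute_idices := by
  intro wires _
  unfold Spec_permute_idices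
  rw [A_eq, B_eq]
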